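-- pv_equiv track=rewrite | github.com/Arsen1302/Code-copy-detector | TestData/solutions/problem_729_5.py | solution_729_5
-- ===== SOURCE A (Python) =====
-- from typing import List
--
-- def solution_729_5(c: List[int], g: List[int], k: int) -> int:
--     s = 0 ; res = 0
--     n = len(c)
--     for i in range(n):
--         if g[i]==0:
--             s += c[i]
--     i,j = 0,0
--     while j<n:
--         if g[j]==1:
--             s += c[j]
--         if j-i+1<k:
--             j+=1
--         elif j-i+1==k:
--             res = max(res,s)
--             if g[i]==1:
--                 s-=c[i]
--             i+=1
--             j+=1
--     return res
-- ===== SOURCE B (Python) =====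
-- from typing import List
--
-- def solution_729_5(c: List[int], g: List[int], k: int) -> int:
--     n = len(c)
--     base = sum(ci for ci, gi in zip(c, g) if gi == 0)
--     P = [0]
--     for ci, gi in zip(c, g):
--         P.append(P[-1] + (ci if gi == 1 else 0))
--     res = 0
--     for start in range(n - k + 1):
--         res = max(res, base + P[start + k] - P[start])
--     return res
-- ===== Notes on version B (the rewrite author's own statement) =====
-- stated objective: simpler
-- what changed: A's incremental two-pointer sliding window (add on enter, subtract on leave, max on each full window) is replaced by computing the g==0 base sum once, a prefix-sum list P of the g==1 contributions, and a single direct pass taking max(res, base + P[start+k] - P[start]) over all window starts.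
-- outside the precondition, e.g. on solution_729_5([], [], 0): A returns 0, B returns 0; on solution_729_5([], [], -1): A returns 0, B raises IndexError
import Mathlib
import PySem

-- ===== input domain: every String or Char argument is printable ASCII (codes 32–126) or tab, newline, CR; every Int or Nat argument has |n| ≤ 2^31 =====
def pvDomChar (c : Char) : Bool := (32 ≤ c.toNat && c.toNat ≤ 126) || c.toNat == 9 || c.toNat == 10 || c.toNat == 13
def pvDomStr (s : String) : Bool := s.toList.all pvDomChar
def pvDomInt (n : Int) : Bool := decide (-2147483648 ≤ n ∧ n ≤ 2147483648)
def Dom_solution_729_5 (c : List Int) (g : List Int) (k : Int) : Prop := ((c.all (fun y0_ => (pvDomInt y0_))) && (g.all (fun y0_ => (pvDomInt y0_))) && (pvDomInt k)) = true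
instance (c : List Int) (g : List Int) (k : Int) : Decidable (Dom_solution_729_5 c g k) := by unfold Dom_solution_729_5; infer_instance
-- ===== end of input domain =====

-- B replaces A's incremental slide-the-window two-pointer loop with a prefix-sum table and one
-- direct pass over the window starts (objective: simpler/alternative; same O(n) cost).

-- ===== PORT A =====
-- A's while loop.  Indices i j are in range under Pre_ (j < n = len c ≤ len g), so getD is exact
-- there.  The final `else res` branch is unreachable from i = j = 0 when 1 ≤ k; on it the Python
-- loop never advances (diverges), which Pre_ excludes via 1 ≤ k.
def pvLoopA (c g : List Int) (k : Int) (n : Nat) (i j : Nat) (s res : Int) : Int :=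
  if h : j < n then
    let s1 := if g.getD j 0 = 1 then s + c.getD j 0 else s
    if (j : Int) - (i : Int) + 1 < k then
      pvLoopA c g k n i (j + 1) s1 res
    else if (j : Int) - (i : Int) + 1 = k then
      let res1 := max res s1
      let s2 := if g.getD i 0 = 1 then s1 - c.getD i 0 else s1
      pvLoopA c g k n (i + 1) (j + 1) s2 res1
    else res
  else res
termination_by n - j

def solution_729_5 (c : List Int) (g : List Int) (k : Int) : Int :=
  let n := c.length
  let s := (List.range n).foldl (fun s i => if g.getD i 0 = 0 then s + c.getD i 0 else s) 0
  pvLoopA c g k n 0 0 s 0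

-- ===== PORT B =====
-- B's prefix list P: P = [0]; for ci, gi in zip(c, g): P.append(P[-1] + (ci if gi == 1 else 0))
def pvPrefix (c g : List Int) (acc : Int) : List Int :=
  match c, g with
  | ci :: cs, gi :: gs => acc :: pvPrefix cs gs (acc + if gi = 1 then ci else 0)
  | _, _ => [acc]

-- P[start] / P[start + k] are in range for every start produced by the range under Pre_, so pyGetD is exact there.
def solution_729_5_alt (c : List Int) (g : List Int) (k : Int) : Int :=
  let n := c.length
  let base := (c.zip g).foldl (fun b p => if p.2 = 0 then b + p.1 else b) 0
  let P := pvPrefix c g 0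
  (PySem.List.pyRange 0 ((n : Int) - k + 1) 1).foldl
    (fun res start => max res (base + PySem.List.pyGetD P (start + k) 0 - PySem.List.pyGetD P start 0)) 0

-- ===== PRECONDITION & SPEC =====
-- Pre_ excludes k ≤ 0, where A's two-pointer loop never advances and diverges whenever c ≠ []
-- (for c = [] and k ≤ 0 A returns 0; those degenerate inputs are the only returning ones excluded),
-- and it requires len g ≥ len c, without which A raises IndexError reading g[i].
def Pre_solution_729_5 (c : List Int) (g : List Int) (k : Int) : Prop :=
  1 ≤ k ∧ c.length ≤ g.length
instance (c : List Int) (g : List Int) (k : Int) : Decidable (Pre_solution_729_5 c g k) := by unfold Pre_solution_729_5; infer_instance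

def pvWitness_solution_729_5 : List Int × List Int × Int := ([3, -1, 4, 1], [1, 0, 1, 1], 2)

def Spec_solution_729_5 (c : List Int) (g : List Int) (k : Int) (out : Int) : Prop := out = solution_729_5_alt c g k
instance (c : List Int) (g : List Int) (k : Int) (out : Int) : Decidable (Spec_solution_729_5 c g k out) := by unfold Spec_solution_729_5; infer_instance

-- ===== CLAIM (what is proved, stated in full; the proofs are below) =====
def Claim_equal_solution_729_5 : Prop := ∀ (c : List Int) (g : List Int) (k : Int), Dom_solution_729_5 c g k → Pre_solution_729_5 c g k → Spec_solution_729_5 c g k (solution_729_5 c g k)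

-- ===== LEMMAS AND PROOFS =====

-- sum of c[t] over positions with g[t] = 0 (A's first loop / B's base)
def pvSumZeros : List Int → List Int → Int
  | x :: cs, y :: gs => (if y = 0 then x else 0) + pvSumZeros cs gs
  | _, _ => 0

-- sum of c[t] over positions t < bound with g[t] = 1 (the prefix sums)
def pvPn : List Int → List Int → Nat → Int
  | x :: cs, y :: gs, t + 1 => (if y = 1 then x else 0) + pvPn cs gs t
  | _, _, _ => 0

-- the window value at start u, and the fold both programs compute
def pvW (c g : List Int) (K : Nat) (u : Nat) : Int :=
  pvSumZeros c g + pvPn c g (u + K) - pvPn c g u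

lemma pvPn_zero (c g : List Int) : pvPn c g 0 = 0 := by
  cases c <;> cases g <;> rfl

lemma pvPn_succ (c g : List Int) : ∀ t, t < c.length → c.length ≤ g.length →
    pvPn c g (t + 1) = pvPn c g t + (if g.getD t 0 = 1 then c.getD t 0 else 0) := by
  induction c generalizing g with
  | nil => intro t ht _; simp at ht
  | cons x cs ih =>
    intro t ht hlen
    cases g with
    | nil => simp at hlen
    | cons y gs =>
      cases t with
      | zero => simp [pvPn, pvPn_zero]
      | succ t =>
        simp only [pvPn, List.getD_cons_succ]
        rw [ih gs t (by simpa using ht) (by simpa using hlen)]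
        ring

lemma pvInitA (c : List Int) : ∀ (g : List Int) (s : Int), c.length ≤ g.length →
    (List.range c.length).foldl (fun s i => if g.getD i 0 = 0 then s + c.getD i 0 else s) s
      = s + pvSumZeros c g := by
  induction c with
  | nil => intro g s _; simp [pvSumZeros]
  | cons x cs ih =>
    intro g s hlen
    cases g with
    | nil => simp at hlen
    | cons y gs =>
      rw [List.length_cons, List.range_succ_eq_map, List.foldl_cons, List.foldl_map]
      simp only [List.getD_cons_succ, List.getD_cons_zero]
      rw [ih gs _ (by simpa using hlen)]
      simp only [pvSumZeros]
      split_ifs <;> ring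

lemma pvBaseB (c : List Int) : ∀ (g : List Int) (b : Int),
    (c.zip g).foldl (fun b p => if p.2 = 0 then b + p.1 else b) b = b + pvSumZeros c g := by
  induction c with
  | nil => intro g b; simp [pvSumZeros]
  | cons x cs ih =>
    intro g b
    cases g with
    | nil => simp [pvSumZeros]
    | cons y gs =>
      simp only [List.zip_cons_cons, List.foldl_cons]
      rw [ih gs _]
      simp only [pvSumZeros]
      split_ifs <;> ring

lemma pvPrefix_getD : ∀ (t : Nat) (c g : List Int) (acc : Int), t ≤ c.length → c.length ≤ g.length →
    (pvPrefix c g acc).getD t 0 = acc + pvPn c g t := by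
  intro t
  induction t with
  | zero =>
    intro c g acc _ hlen
    cases c with
    | nil => simp [pvPrefix, pvPn]
    | cons x cs =>
      cases g with
      | nil => simp at hlen
      | cons y gs => simp [pvPrefix, pvPn_zero]
  | succ t ih =>
    intro c g acc ht hlen
    cases c with
    | nil => simp at ht
    | cons x cs =>
      cases g with
      | nil => simp at hlen
      | cons y gs =>
        simp only [pvPrefix, List.getD_cons_succ, pvPn]
        rw [ih cs gs _ (by simpa using ht) (by simpa using hlen)]
        ring

-- the steady phase: from state (i, j = i + K', s = base + P[i+K'] - P[i]) the loop folds the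
-- remaining windows i, i+1, …, n-K'-1 into res
lemma pvLoopA_steady (c g : List Int) (k : Int) (K' : Nat) (hk : k = (K' : Int) + 1)
    (hlen : c.length ≤ g.length) :
    ∀ d i res, c.length - i ≤ d →
      pvLoopA c g k c.length i (i + K')
          (pvSumZeros c g + pvPn c g (i + K') - pvPn c g i) res
        = (List.range' i (c.length + 1 - (K' + 1) - i)).foldl
            (fun r u => max r (pvW c g (K' + 1) u)) res := by
  intro d
  induction d with
  | zero =>
    intro i res hd
    have hi : c.length ≤ i := by omega
    rw [pvLoopA, dif_neg (by omega : ¬ (i + K' < c.length))]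
    rw [show c.length + 1 - (K' + 1) - i = 0 from by omega]
    simp
  | succ d ih =>
    intro i res hd
    by_cases hj : i + K' < c.length
    · rw [pvLoopA, dif_pos hj]
      have hlt : ¬ (((i + K' : Nat) : Int) - (i : Int) + 1 < k) := by rw [hk]; push_cast; omega
      have heq : (((i + K' : Nat) : Int) - (i : Int) + 1 = k) := by rw [hk]; push_cast; omega
      rw [if_neg hlt, if_pos heq]
      have hs1 : (if g.getD (i + K') 0 = 1
            then pvSumZeros c g + pvPn c g (i + K') - pvPn c g i + c.getD (i + K') 0
            else pvSumZeros c g + pvPn c g (i + K') - pvPn c g i)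
          = pvSumZeros c g + pvPn c g (i + K' + 1) - pvPn c g i := by
        rw [pvPn_succ c g (i + K') hj hlen]
        split_ifs <;> ring
      rw [hs1]
      have hs2 : (if g.getD i 0 = 1
            then pvSumZeros c g + pvPn c g (i + K' + 1) - pvPn c g i - c.getD i 0
            else pvSumZeros c g + pvPn c g (i + K' + 1) - pvPn c g i)
          = pvSumZeros c g + pvPn c g (i + 1 + K') - pvPn c g (i + 1) := by
        rw [pvPn_succ c g i (by omega) hlen, show i + 1 + K' = i + K' + 1 from by omega]
        split_ifs <;> ring
      rw [hs2, show i + K' + 1 = i + 1 + K' from by omega]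
      show pvLoopA c g k c.length (i + 1) (i + 1 + K')
          (pvSumZeros c g + pvPn c g (i + 1 + K') - pvPn c g (i + 1))
          (max res (pvSumZeros c g + pvPn c g (i + 1 + K') - pvPn c g i)) = _
      rw [ih (i + 1) (max res (pvSumZeros c g + pvPn c g (i + 1 + K') - pvPn c g i)) (by omega)]
      have hcnt : c.length + 1 - (K' + 1) - i = (c.length + 1 - (K' + 1) - (i + 1)) + 1 := by omega
      rw [hcnt, List.range'_succ, List.foldl_cons]
      have hw : pvW c g (K' + 1) i = pvSumZeros c g + pvPn c g (i + 1 + K') - pvPn c g i := by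
        simp [pvW, show i + (K' + 1) = i + 1 + K' from by omega]
      rw [hw]
    · rw [pvLoopA, dif_neg hj]
      rw [show c.length + 1 - (K' + 1) - i = 0 from by omega]
      simp

-- the growing phase: i = 0, j ≤ K'; the result is the whole fold, independent of j
lemma pvLoopA_grow (c g : List Int) (k : Int) (K' : Nat) (hk : k = (K' : Int) + 1)
    (hlen : c.length ≤ g.length) :
    ∀ d j, j ≤ K' → K' - j ≤ d →
      pvLoopA c g k c.length 0 j (pvSumZeros c g + pvPn c g j) 0
        = (List.range' 0 (c.length + 1 - (K' + 1))).foldl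
            (fun r u => max r (pvW c g (K' + 1) u)) 0 := by
  intro d
  induction d with
  | zero =>
    intro j hj hd
    rw [show j = K' from by omega]
    simpa [pvPn_zero] using pvLoopA_steady c g k K' hk hlen (c.length) 0 0 (by omega)
  | succ d ih =>
    intro j hj hd
    by_cases hjK : j = K'
    · rw [hjK]
      simpa [pvPn_zero] using pvLoopA_steady c g k K' hk hlen (c.length) 0 0 (by omega)
    · by_cases hjn : j < c.length
      · rw [pvLoopA, dif_pos hjn]
        have hlt : ((j : Int) - ((0 : Nat) : Int) + 1 < k) := by rw [hk]; push_cast; omega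
        rw [if_pos hlt]
        have hs1 : (if g.getD j 0 = 1
              then pvSumZeros c g + pvPn c g j + c.getD j 0
              else pvSumZeros c g + pvPn c g j)
            = pvSumZeros c g + pvPn c g (j + 1) := by
          rw [pvPn_succ c g j hjn hlen]
          split_ifs <;> ring
        rw [hs1]
        exact ih (j + 1) (by omega) (by omega)
      · rw [pvLoopA, dif_neg hjn]
        rw [show c.length + 1 - (K' + 1) = 0 from by omega]
        simp

-- ===== VERDICT (by name: the statement is the Claim_ definition above) =====
theorem solution_729_5_spec : Claim_equal_solution_729_5 := by
  intro c g k _ hpre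
  obtain ⟨hk1, hlen⟩ := hpre
  obtain ⟨K', hk⟩ : ∃ K' : Nat, k = (K' : Int) + 1 := ⟨(k - 1).toNat, by omega⟩
  unfold Spec_solution_729_5 solution_729_5 solution_729_5_alt
  simp only []
  rw [pvInitA c g 0 hlen]
  have hA := pvLoopA_grow c g k K' hk hlen K' 0 (by omega) (by omega)
  rw [show (0 : Int) + pvSumZeros c g = pvSumZeros c g + pvPn c g 0 from by
        rw [pvPn_zero]; ring] at *
  rw [hA]
  -- now the B side
  rw [pvBaseB c g 0]
  have hM : ((c.length : Int) - k + 1).toNat = c.length + 1 - (K' + 1) := by omega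
  rw [PySem.List.pyRange_one]
  rw [List.foldl_map]
  rw [show ((c.length : Int) - k + 1 - 0) = ((c.length : Int) - k + 1) from by ring, hM]
  rw [← List.range_eq_range']
  set M := c.length + 1 - (K' + 1) with hMdef
  have hfold : ∀ (l : List Nat), (∀ u ∈ l, u + (K' + 1) ≤ c.length) → ∀ (res : Int),
      l.foldl (fun (res : Int) (t : Nat) => max res (0 + pvSumZeros c g
          + PySem.List.pyGetD (pvPrefix c g 0) ((0 : Int) + (t : Int) + k) 0
          - PySem.List.pyGetD (pvPrefix c g 0) ((0 : Int) + (t : Int)) 0)) res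
        = l.foldl (fun r u => max r (pvW c g (K' + 1) u)) res := by
    intro l
    induction l with
    | nil => intro _ res; rfl
    | cons u us ihl =>
      intro hl res
      simp only [List.foldl_cons]
      rw [ihl (fun v hv => hl v (List.mem_cons_of_mem _ hv))]
      congr 1
      have hu : u + (K' + 1) ≤ c.length := hl u (List.mem_cons_self)
      have h1 : ((0 : Int) + (u : Int) + k) = ((u + (K' + 1) : Nat) : Int) := by
        rw [hk]; push_cast; ring
      have h2 : ((0 : Int) + (u : Int)) = ((u : Nat) : Int) := by ring
      rw [h1, h2, PySem.List.pyGetD_natCast, PySem.List.pyGetD_natCast]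
      rw [pvPrefix_getD (u + (K' + 1)) c g 0 hu hlen,
          pvPrefix_getD u c g 0 (by omega) hlen]
      simp [pvW]
  rw [hfold (List.range M) (fun u hu => by
    have := List.mem_range.mp hu
    omega) 0]
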